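-- pv_equiv track=rewrite | github.com/ctavolazzi/datavault | build/lib/src/utils/project_manager.py | _find_duplicate_paths
-- ===== SOURCE A (Python) =====
-- def _find_duplicate_paths(paths: list[str]) -> list[str]:
--     """Find any duplicate paths in the list"""
--     seen = set()
--     duplicates = []
--
--     for path in paths:
--         if path in seen:
--             duplicates.append(path)
--         else:
--             seen.add(path)
--             # Also check if any parent path exists as a leaf node
--             parts = path.split('/')
--             for i in range(len(parts)):
--                 partial = '/'.join(parts[:i+1])
--                 if partial != path and partial in seen:
--                     duplicates.append(partial)
--
--     return duplicates
-- ===== SOURCE B (Python) =====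
-- def _child(children, terminal, node, seg):
--     """Follow (or create) the trie edge `seg` out of `node`; return the child id."""
--     nxt = children[node].get(seg)
--     if nxt is None:
--         nxt = len(children)
--         children[node][seg] = nxt
--         children.append({})
--         terminal.append(False)
--     return nxt
--
--
-- def _find_duplicate_paths(paths: list[str]) -> list[str]:
--     """Find any duplicate paths in the list.
--
--     Uses an incremental segment trie (arena representation): each previously
--     seen path marks a terminal node.  For each path we make one descent,
--     collecting every marked intermediate node (an earlier-seen proper prefix
--     path, shortest first); if the final node is already marked the path is an
--     exact duplicate and only the path itself is reported.
--     """
--     children = [{}]          # node id -> {segment: child node id}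
--     terminal = [False]       # node id -> was a previously seen full path
--     out = []
--     for path in paths:
--         segs = path.split('/')
--         acc = segs[0]
--         found = []
--         node = _child(children, terminal, 0, segs[0])
--         for seg in segs[1:]:
--             if terminal[node]:
--                 found.append(acc)
--             acc = acc + '/' + seg
--             node = _child(children, terminal, node, seg)
--         if terminal[node]:
--             out.append(path)          # exact duplicate
--         else:
--             out.extend(found)         # earlier-seen proper prefix paths
--             terminal[node] = True
--     return out
-- ===== Notes on version B (the rewrite author's own statement) =====
-- stated objective: alternative
-- what changed: Replaces A's flat string set plus per-path re-join of every parts[:i+1] slice with an incremental segment trie (arena of nodes with child dicts and terminal flags): one descent per path collects earlier-seen proper-prefix paths as marked intermediate nodes and detects an exact duplicate as an already-marked final node.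
import Mathlib
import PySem

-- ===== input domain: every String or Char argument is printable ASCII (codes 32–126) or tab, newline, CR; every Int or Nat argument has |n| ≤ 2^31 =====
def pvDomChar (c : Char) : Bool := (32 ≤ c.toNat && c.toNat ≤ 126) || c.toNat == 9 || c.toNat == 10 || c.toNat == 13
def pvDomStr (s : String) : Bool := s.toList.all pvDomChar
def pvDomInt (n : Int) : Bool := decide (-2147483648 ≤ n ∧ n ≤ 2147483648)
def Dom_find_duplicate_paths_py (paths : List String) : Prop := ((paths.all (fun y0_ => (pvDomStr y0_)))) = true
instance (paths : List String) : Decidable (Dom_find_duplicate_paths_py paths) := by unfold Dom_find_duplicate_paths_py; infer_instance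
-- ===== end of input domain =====

-- B replaces A's flat string set (and its per-prefix re-join of every parts[:i+1] slice checked
-- against that set) with an incremental segment trie held in an arena (child dicts + terminal
-- flags): one descent per path collects earlier-seen proper-prefix paths as marked intermediate
-- nodes and detects an exact duplicate as an already-marked final node (objective: alternative;
-- return values are identical).

-- ===== PORT A =====
-- Python's path.split('/'): '/' is a non-empty separator, so split? is always `some`
def pyparts (p : String) : List String := (PySem.Str.split? p "/").getD []

-- the body of A's outer `for path in paths` loop (state: the `seen` set, the `duplicates` list)
def aStep (st : PySem.Set String × List String) (path : String) : PySem.Set String × List String :=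
  if PySem.Set.contains st.1 path then (st.1, st.2 ++ [path])
  else
    let seen := PySem.Set.add st.1 path
    let parts := pyparts path
    (seen,
      (PySem.List.pyRange 0 (parts.length : Int)).foldl
        (fun dups i =>
          let part := PySem.Str.join "/" (PySem.List.slice parts none (some (i + 1)))
          if part ≠ path ∧ PySem.Set.contains seen part = true then dups ++ [part] else dups)
        st.2)

def find_duplicate_paths_py (paths : List String) : List String :=
  (paths.foldl aStep (PySem.Set.empty, [])).2

-- ===== PORT B =====
-- B's `_child` helper: follow (or create) the trie edge `seg` out of `node`
-- (the arena: `ch` = per-node child dict, `tm` = per-node terminal flag)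
def childF (ch : List (PySem.Dict String Nat)) (tm : List Bool) (node : Nat) (seg : String) :
    Nat × List (PySem.Dict String Nat) × List Bool :=
  match (ch.getD node PySem.Dict.empty).get? seg with
  | some m => (m, ch, tm)
  | none =>
      let n := ch.length
      (n, (ch.set node ((ch.getD node PySem.Dict.empty).insert seg n)) ++ [PySem.Dict.empty],
        tm ++ [false])

-- the body of B's inner `for seg in segs[1:]` loop (state: node, acc, found, and the arena)
def bInner (st : Nat × String × List String × List (PySem.Dict String Nat) × List Bool)
    (seg : String) : Nat × String × List String × List (PySem.Dict String Nat) × List Bool :=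
  match st with
  | (node, acc, found, ch, tm) =>
    let found' := if tm.getD node false then found ++ [acc] else found
    let acc' := acc ++ "/" ++ seg
    match childF ch tm node seg with
    | (nxt, ch', tm') => (nxt, acc', found', ch', tm')

-- the body of B's outer `for path in paths` loop
-- (the `[]` branch only totalizes the match: split('/') never returns an empty list)
def bStep (st : List (PySem.Dict String Nat) × List Bool × List String) (path : String) :
    List (PySem.Dict String Nat) × List Bool × List String :=
  match st with
  | (ch, tm, out) =>
    match pyparts path with
    | [] => (ch, tm, out)
    | s0 :: rest =>
      match childF ch tm 0 s0 with
      | (n0, ch0, tm0) =>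
        match rest.foldl bInner (n0, s0, ([] : List String), ch0, tm0) with
        | (node, _, found, ch1, tm1) =>
          if tm1.getD node false then (ch1, tm1, out ++ [path])
          else (ch1, tm1.set node true, out ++ found)

def find_duplicate_paths_py_alt (paths : List String) : List String :=
  (paths.foldl bStep ([PySem.Dict.empty], [false], [])).2.2

-- ===== PRECONDITION & SPEC =====
def Spec_find_duplicate_paths_py (paths : List String) (out : List String) : Prop := out = find_duplicate_paths_py_alt paths
instance (paths : List String) (out : List String) : Decidable (Spec_find_duplicate_paths_py paths out) := by unfold Spec_find_duplicate_paths_py; infer_instance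

-- ===== CLAIM (what is proved, stated in full; the proofs are below) =====
def Claim_equal_find_duplicate_paths_py : Prop := ∀ (paths : List String), Dom_find_duplicate_paths_py paths → Spec_find_duplicate_paths_py paths (find_duplicate_paths_py paths)

-- ===== LEMMAS AND PROOFS =====

-- ---- facts about PySem.Chars.splitOn / join (single-character separator) ----

theorem go0 (sep : List Char) (l cur : List Char) (acc : List (List Char)) :
    PySem.Chars.splitOn.go sep 0 l cur acc = ((cur.reverse ++ l) :: acc).reverse := by
  rw [PySem.Chars.splitOn.go]
theorem goNil (sep : List Char) (fuel : Nat) (cur : List Char) (acc : List (List Char)) :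
    PySem.Chars.splitOn.go sep (fuel+1) [] cur acc = (cur.reverse :: acc).reverse := by
  rw [PySem.Chars.splitOn.go]
  omega
theorem goCons (sep : List Char) (fuel : Nat) (c : Char) (rest cur : List Char) (acc : List (List Char)) :
    PySem.Chars.splitOn.go sep (fuel+1) (c :: rest) cur acc =
      if sep.isPrefixOf (c :: rest) then
        PySem.Chars.splitOn.go sep fuel (List.drop sep.length (c :: rest)) [] (cur.reverse :: acc)
      else PySem.Chars.splitOn.go sep fuel rest (c :: cur) acc := by
  rw [PySem.Chars.splitOn.go]

theorem go_ne_nil (sep : List Char) (fuel : Nat) (l cur : List Char) (acc : List (List Char)) :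
    PySem.Chars.splitOn.go sep fuel l cur acc ≠ [] := by
  induction fuel generalizing l cur acc with
  | zero => rw [go0]; simp
  | succ f ih =>
    cases l with
    | nil => rw [goNil]; simp
    | cons c rest =>
      rw [goCons]
      split
      · exact ih _ _ _
      · exact ih _ _ _

theorem go_acc (c : Char) (fuel : Nat) (l cur : List Char) (acc : List (List Char))
    (h : l.length < fuel) :
    PySem.Chars.splitOn.go [c] fuel l cur acc =
      acc.reverse ++ PySem.Chars.splitOn.go [c] fuel l cur [] := by
  induction fuel generalizing l cur acc with
  | zero => omega
  | succ f ih =>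
    cases l with
    | nil => rw [goNil, goNil]; simp
    | cons c' rest =>
      rw [goCons, goCons]
      by_cases hp : [c].isPrefixOf (c' :: rest) = true
      · simp only [hp, if_pos]
        have hlen : rest.length < f := by
          simp at h; omega
        have hd : List.drop [c].length (c' :: rest) = rest := by simp
        rw [hd]
        rw [ih rest [] (cur.reverse :: acc) hlen, ih rest [] [cur.reverse] hlen]
        try simp
      · simp only [hp, if_neg, Bool.not_eq_true]
        have hlen : rest.length < f := by simp at h; omega
        rw [ih rest (c' :: cur) acc hlen, ih rest (c' :: cur) [] hlen]
        try simp

theorem go_join (c : Char) (fuel : Nat) (l cur : List Char) (h : l.length < fuel) :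
    PySem.Chars.join [c] (PySem.Chars.splitOn.go [c] fuel l cur []) = cur.reverse ++ l := by
  induction fuel generalizing l cur with
  | zero => omega
  | succ f ih =>
    cases l with
    | nil => rw [goNil]; simp [PySem.Chars.join_singleton]
    | cons c' rest =>
      rw [goCons]
      by_cases hp : [c].isPrefixOf (c' :: rest) = true
      · have hc : c = c' := by simpa [List.isPrefixOf] using hp
        simp only [hp, if_pos]
        have hlen : rest.length < f := by simp at h; omega
        have hd : List.drop [c].length (c' :: rest) = rest := by simp
        rw [hd, go_acc c f rest [] [cur.reverse] hlen]
        obtain ⟨y, ys, hys⟩ : ∃ y ys, PySem.Chars.splitOn.go [c] f rest [] [] = y :: ys := by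
          cases hgo : PySem.Chars.splitOn.go [c] f rest [] [] with
          | nil => exact absurd hgo (go_ne_nil _ _ _ _ _)
          | cons y ys => exact ⟨y, ys, rfl⟩
        rw [hys]
        simp only [List.reverse_cons, List.reverse_nil, List.nil_append, List.singleton_append]
        rw [PySem.Chars.join_cons_cons]
        rw [← hys, ih rest [] hlen]
        simp [hc]
      · simp only [hp, if_neg, Bool.not_eq_true]
        have hlen : rest.length < f := by simp at h; omega
        rw [ih rest (c' :: cur) hlen]
        simp

theorem splitOn_roundtrip (c : Char) (l : List Char) :
    PySem.Chars.join [c] (PySem.Chars.splitOn l [c]) = l := by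
  have := go_join c (l.length + 1) l [] (by omega)
  simpa [PySem.Chars.splitOn] using this

theorem splitOn_ne_nil (l sep : List Char) : PySem.Chars.splitOn l sep ≠ [] := by
  exact go_ne_nil _ _ _ _ _

theorem join_append (sep : List Char) (l₁ l₂ : List (List Char)) (h₁ : l₁ ≠ []) (h₂ : l₂ ≠ []) :
    PySem.Chars.join sep (l₁ ++ l₂) = PySem.Chars.join sep l₁ ++ sep ++ PySem.Chars.join sep l₂ := by
  induction l₁ with
  | nil => exact absurd rfl h₁
  | cons a t ih =>
    cases t with
    | nil =>
      cases l₂ with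
      | nil => exact absurd rfl h₂
      | cons b u =>
        simp only [List.singleton_append, PySem.Chars.join_cons_cons, PySem.Chars.join_singleton]
    | cons a2 t2 =>
      have h1 : PySem.Chars.join sep ((a :: a2 :: t2) ++ l₂) =
          a ++ sep ++ PySem.Chars.join sep ((a2 :: t2) ++ l₂) := by
        rw [List.cons_append, List.cons_append, PySem.Chars.join_cons_cons]
      rw [h1, ih (by simp), PySem.Chars.join_cons_cons]
      simp [List.append_assoc]

-- ---- new: segments produced by splitOn are separator-free, and join/splitOn round-trips both ways ----

theorem noSep_go (fuel : Nat) (l cur : List Char) (acc : List (List Char))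
    (hf : l.length < fuel) (hcur : ('/' : Char) ∉ cur) (hacc : ∀ x ∈ acc, ('/' : Char) ∉ x) :
    ∀ x ∈ PySem.Chars.splitOn.go ['/'] fuel l cur acc, ('/' : Char) ∉ x := by
  induction fuel generalizing l cur acc with
  | zero => omega
  | succ f ih =>
    cases l with
    | nil =>
      rw [goNil]
      intro x hx
      simp only [List.mem_reverse, List.mem_cons] at hx
      rcases hx with h | h
      · subst h; simpa using hcur
      · exact hacc x h
    | cons c rest =>
      rw [goCons]
      by_cases hp : List.isPrefixOf ['/'] (c :: rest) = true
      · simp only [hp, if_pos]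
        have hd : List.drop (['/'] : List Char).length (c :: rest) = rest := by simp
        rw [hd]
        refine ih rest [] (cur.reverse :: acc) (by simp at hf ⊢; omega) (by simp) ?_
        intro x hx
        rcases List.mem_cons.mp hx with h | h
        · subst h; simpa using hcur
        · exact hacc x h
      · simp only [hp, if_neg, Bool.not_eq_true]
        have hc : c ≠ '/' := by
          intro h; subst h; simp [List.isPrefixOf] at hp
        refine ih rest (c :: cur) acc (by simp at hf ⊢; omega) ?_ hacc
        intro h
        rcases List.mem_cons.mp h with h | h
        · exact hc h.symm
        · exact hcur h

theorem noSep (l : List Char) : ∀ x ∈ PySem.Chars.splitOn l ['/'], ('/' : Char) ∉ x := by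
  have := noSep_go (l.length + 1) l [] [] (by omega) (by simp) (by simp)
  simpa [PySem.Chars.splitOn] using this

theorem go_eats (a : List Char) (ha : ('/' : Char) ∉ a) :
    ∀ (fuel : Nat) (rest cur : List Char) (acc : List (List Char)),
    a.length + rest.length < fuel →
    PySem.Chars.splitOn.go ['/'] fuel (a ++ rest) cur acc =
      PySem.Chars.splitOn.go ['/'] (fuel - a.length) rest (a.reverse ++ cur) acc := by
  induction a with
  | nil => intro fuel rest cur acc _; simp
  | cons c a' ih =>
    intro fuel rest cur acc hf
    cases fuel with
    | zero => omega
    | succ f =>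
      rw [List.cons_append, goCons]
      have hc : c ≠ '/' := fun h => ha (by simp [h])
      have hp : List.isPrefixOf ['/'] (c :: (a' ++ rest)) = false := by
        simp [List.isPrefixOf]; exact fun h => absurd h.symm hc
      rw [hp]
      simp only [Bool.false_eq_true, if_false]
      rw [ih (fun h => ha (by simp [h])) f rest (c :: cur) acc (by simp at hf ⊢; omega)]
      have : a'.reverse ++ (c :: cur) = (c :: a').reverse ++ cur := by
        simp [List.append_assoc]
      rw [this]
      have hfu : f + 1 - (c :: a').length = f - a'.length := by
        simp only [List.length_cons]
        omega
      rw [hfu]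

theorem go_sepfree_join (ls : List (List Char)) :
    ∀ (a : List Char), ('/' : Char) ∉ a → (∀ x ∈ ls, ('/' : Char) ∉ x) →
    ∀ (fuel : Nat) (cur : List Char) (acc : List (List Char)),
    (PySem.Chars.join ['/'] (a :: ls)).length < fuel →
    PySem.Chars.splitOn.go ['/'] fuel (PySem.Chars.join ['/'] (a :: ls)) cur acc =
      acc.reverse ++ (cur.reverse ++ a) :: ls := by
  induction ls with
  | nil =>
    intro a ha _ fuel cur acc hf
    rw [PySem.Chars.join_singleton] at hf ⊢
    have h1 := go_eats a ha fuel [] cur acc (by simpa using hf)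
    simp only [List.append_nil] at h1
    rw [h1]
    obtain ⟨f, hfeq⟩ : ∃ f, fuel - a.length = f + 1 := ⟨fuel - a.length - 1, by omega⟩
    rw [hfeq, goNil]
    simp
  | cons b ls' ih =>
    intro a ha hls fuel cur acc hf
    have hjoin : PySem.Chars.join ['/'] (a :: b :: ls') =
        a ++ ('/' :: PySem.Chars.join ['/'] (b :: ls')) := by
      rw [PySem.Chars.join_cons_cons]
      simp [List.append_assoc]
    rw [hjoin] at hf ⊢
    have hlen : a.length + ('/' :: PySem.Chars.join ['/'] (b :: ls')).length < fuel := by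
      simp at hf ⊢; omega
    rw [go_eats a ha fuel _ cur acc hlen]
    obtain ⟨f, hfeq⟩ : ∃ f, fuel - a.length = f + 1 ∧
        (PySem.Chars.join ['/'] (b :: ls')).length < f := by
      refine ⟨fuel - a.length - 1, ?_, ?_⟩ <;> (simp at hf ⊢; omega)
    rw [hfeq.1, goCons]
    have hp : List.isPrefixOf ['/'] ('/' :: PySem.Chars.join ['/'] (b :: ls')) = true := by
      simp [List.isPrefixOf]
    rw [hp]
    simp only [if_pos]
    have hd : List.drop (['/'] : List Char).length ('/' :: PySem.Chars.join ['/'] (b :: ls')) =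
        PySem.Chars.join ['/'] (b :: ls') := by simp
    rw [hd]
    rw [ih b (hls b (by simp)) (fun x hx => hls x (by simp [hx])) f [] _ hfeq.2]
    simp

theorem splitOn_join_sepfree (ls : List (List Char)) (h : ls ≠ [])
    (hs : ∀ x ∈ ls, ('/' : Char) ∉ x) :
    PySem.Chars.splitOn (PySem.Chars.join ['/'] ls) ['/'] = ls := by
  cases ls with
  | nil => exact absurd rfl h
  | cons a ls' =>
    have := go_sepfree_join ls' a (hs a (by simp)) (fun x hx => hs x (by simp [hx]))
      ((PySem.Chars.join ['/'] (a :: ls')).length + 1) [] [] (by omega)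
    simpa [PySem.Chars.splitOn] using this

-- ---- String-level consequences for path.split('/') ----

theorem slash_toList : "/".toList = ['/'] := by decide

theorem pyparts_eq (p : String) :
    pyparts p = (PySem.Chars.splitOn p.toList ['/']).map String.ofList := by
  simp [pyparts, PySem.Str.split?, PySem.Chars.split?, slash_toList]

theorem pyparts_ne_nil (p : String) : pyparts p ≠ [] := by
  rw [pyparts_eq]
  simp [splitOn_ne_nil]

theorem toList_join_take (p : String) (k : Nat) :
    (PySem.Str.join "/" ((pyparts p).take k)).toList =
      PySem.Chars.join ['/'] ((PySem.Chars.splitOn p.toList ['/']).take k) := by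
  rw [pyparts_eq, PySem.Str.toList_join, ← List.map_take, List.map_map, slash_toList]
  congr 1
  simp [Function.comp_def, String.toList_ofList]

theorem join_pyparts (p : String) : PySem.Str.join "/" (pyparts p) = p := by
  have h : (PySem.Str.join "/" (pyparts p)).toList = p.toList := by
    have hl : (pyparts p).length = (PySem.Chars.splitOn p.toList ['/']).length := by
      rw [pyparts_eq]; simp
    have h2 := toList_join_take p (pyparts p).length
    rw [List.take_length] at h2
    rw [hl, List.take_length] at h2
    exact h2.trans (splitOn_roundtrip '/' p.toList)
  calc PySem.Str.join "/" (pyparts p) = String.ofList (PySem.Str.join "/" (pyparts p)).toList := by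
        rw [String.ofList_toList]
    _ = String.ofList p.toList := by rw [h]
    _ = p := String.ofList_toList

theorem join_take_ne (p : String) (k : Nat) (h : k + 1 < (pyparts p).length) :
    PySem.Str.join "/" ((pyparts p).take (k + 1)) ≠ p := by
  intro hEq
  have hlen : (PySem.Str.join "/" ((pyparts p).take (k + 1))).toList.length = p.toList.length := by
    rw [hEq]
  rw [toList_join_take] at hlen
  set L := PySem.Chars.splitOn p.toList ['/'] with hL
  have hLlen : (pyparts p).length = L.length := by rw [pyparts_eq]; simp [hL]
  have hk : k + 1 < L.length := by omega
  have hsplit : L = L.take (k+1) ++ L.drop (k+1) := by simp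
  have hA : L.take (k+1) ≠ [] := by
    intro hnil
    rw [List.take_eq_nil_iff] at hnil
    rcases hnil with h' | h'
    · omega
    · exact splitOn_ne_nil _ _ h'
  have hB : L.drop (k+1) ≠ [] := by
    intro hnil
    rw [List.drop_eq_nil_iff] at hnil
    omega
  have hjoin : p.toList = PySem.Chars.join ['/'] (L.take (k+1)) ++ ['/'] ++ PySem.Chars.join ['/'] (L.drop (k+1)) := by
    conv_lhs => rw [← splitOn_roundtrip '/' p.toList, ← hL, hsplit]
    rw [join_append _ _ _ hA hB]
  rw [hjoin] at hlen
  simp at hlen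

theorem strJoin_singleton (a : String) : PySem.Str.join "/" [a] = a := by
  have h : (PySem.Str.join "/" [a]).toList = a.toList := by
    rw [PySem.Str.toList_join]
    simp [PySem.Chars.join_singleton]
  calc PySem.Str.join "/" [a] = String.ofList (PySem.Str.join "/" [a]).toList := (String.ofList_toList).symm
    _ = String.ofList a.toList := by rw [h]
    _ = a := String.ofList_toList

theorem parts_join_take (p : String) (k : Nat) :
    pyparts (PySem.Str.join "/" ((pyparts p).take (k + 1))) = (pyparts p).take (k + 1) := by
  set L := PySem.Chars.splitOn p.toList ['/'] with hL
  have hLne : L ≠ [] := splitOn_ne_nil _ _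
  have htne : L.take (k+1) ≠ [] := by
    intro hnil
    rw [List.take_eq_nil_iff] at hnil
    rcases hnil with h' | h'
    · omega
    · exact hLne h'
  have hsf : ∀ x ∈ L.take (k+1), ('/' : Char) ∉ x := fun x hx => noSep _ x (List.mem_of_mem_take hx)
  rw [pyparts_eq (PySem.Str.join "/" ((pyparts p).take (k + 1)))]
  rw [toList_join_take, ← hL]
  rw [splitOn_join_sepfree _ htne hsf]
  rw [pyparts_eq, ← hL, List.map_take]

theorem join_snoc (l : List String) (hl : l ≠ []) (x : String) :
    PySem.Str.join "/" (l ++ [x]) = PySem.Str.join "/" l ++ "/" ++ x := by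
  have h : (PySem.Str.join "/" (l ++ [x])).toList = (PySem.Str.join "/" l ++ "/" ++ x).toList := by
    rw [PySem.Str.toList_join, List.map_append]
    rw [join_append _ _ _ (by simpa using hl) (by simp)]
    simp [String.toList_append, PySem.Str.toList_join, PySem.Chars.join_singleton, slash_toList]
  calc PySem.Str.join "/" (l ++ [x]) = String.ofList (PySem.Str.join "/" (l ++ [x])).toList := (String.ofList_toList).symm
    _ = String.ofList (PySem.Str.join "/" l ++ "/" ++ x).toList := by rw [h]
    _ = _ := String.ofList_toList

-- ---- the common reference: per-path contribution given the processed prefix ----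

def cand (p : String) : List String :=
  (List.range ((pyparts p).length - 1)).map (fun k => PySem.Str.join "/" ((pyparts p).take (k + 1)))

def contrib (pre : List String) (p : String) : List String :=
  if p ∈ pre then [p] else (cand p).filter (fun q => decide (q ∈ pre))

def spec : List String → List String → List String
  | _, [] => []
  | pre, p :: rest => contrib pre p ++ spec (pre ++ [p]) rest

-- ---- the trie: resolving a segment list to a node, and the trie invariant ----

def findNode? (ch : List (PySem.Dict String Nat)) : Nat → List String → Option Nat
  | n, [] => some n
  | n, s :: ss =>
    match (ch.getD n PySem.Dict.empty).get? s with
    | none => none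
    | some m => findNode? ch m ss

def Marked (ch : List (PySem.Dict String Nat)) (tm : List Bool) (ss : List String) : Prop :=
  ∃ m, findNode? ch 0 ss = some m ∧ tm.getD m false = true

def TrieInv (ch : List (PySem.Dict String Nat)) (tm : List Bool) (pre : List String) : Prop :=
  ch.length = tm.length ∧ 0 < ch.length ∧
  (∀ k s m, (ch.getD k PySem.Dict.empty).get? s = some m → m < ch.length) ∧
  (∀ ss ss' m, findNode? ch 0 ss = some m → findNode? ch 0 ss' = some m → ss = ss') ∧
  (∀ ss, Marked ch tm ss ↔ ∃ p ∈ pre, pyparts p = ss)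

theorem findNode?_lt (ch : List (PySem.Dict String Nat))
    (hR : ∀ k s m, (ch.getD k PySem.Dict.empty).get? s = some m → m < ch.length) :
    ∀ (ss : List String) (n m : Nat), n < ch.length → findNode? ch n ss = some m → m < ch.length := by
  intro ss
  induction ss with
  | nil => intro n m hn h; simp [findNode?] at h; omega
  | cons s t ih =>
    intro n m hn h
    simp only [findNode?] at h
    cases hg : (ch.getD n PySem.Dict.empty).get? s with
    | none => rw [hg] at h; simp at h
    | some m' =>
      rw [hg] at h
      exact ih m' m (hR n s m' hg) h

theorem findNode?_snoc (ch : List (PySem.Dict String Nat)) (l : List String) (x : String) :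
    ∀ n, findNode? ch n (l ++ [x]) =
      (findNode? ch n l).bind (fun m => findNode? ch m [x]) := by
  induction l with
  | nil => intro n; simp [findNode?]
  | cons s t ih =>
    intro n
    simp only [List.cons_append, findNode?]
    cases hg : (ch.getD n PySem.Dict.empty).get? s with
    | none => simp
    | some m => simpa using ih m

-- getD / set / append helpers
theorem getD_append_lt {α : Type} (l : List α) (x d : α) (k : Nat) (h : k < l.length) :
    (l ++ [x]).getD k d = l.getD k d := by
  simp [List.getD_eq_getElem?_getD, List.getElem?_append_left h]

theorem getD_append_self {α : Type} (l : List α) (x d : α) :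
    (l ++ [x]).getD l.length d = x := by
  simp [List.getD_eq_getElem?_getD]

theorem getD_append_ge {α : Type} (l : List α) (x d : α) (k : Nat) (h : l.length + 1 ≤ k) :
    (l ++ [x]).getD k d = d := by
  have : (l ++ [x]).length ≤ k := by simp; omega
  simp [List.getD_eq_getElem?_getD, List.getElem?_eq_none this]

theorem getD_set_self {α : Type} (l : List α) (i : Nat) (a d : α) (h : i < l.length) :
    (l.set i a).getD i d = a := by
  simp [List.getD_eq_getElem?_getD, h]

theorem getD_set_ne {α : Type} (l : List α) (i j : Nat) (a d : α) (h : i ≠ j) :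
    (l.set i a).getD j d = l.getD j d := by
  simp [List.getD_eq_getElem?_getD, List.getElem?_set_ne h]

theorem getD_ge {α : Type} (l : List α) (d : α) (k : Nat) (h : l.length ≤ k) :
    l.getD k d = d := by
  simp [List.getD_eq_getElem?_getD, List.getElem?_eq_none h]

-- ---- creation of a fresh node: edge characterization and findNode? characterization ----

theorem edge_create (ch : List (PySem.Dict String Nat)) (node : Nat) (seg : String)
    (hnode : node < ch.length)
    (hmiss : (ch.getD node PySem.Dict.empty).get? seg = none) (k : Nat) (s : String) :
    ((((ch.set node ((ch.getD node PySem.Dict.empty).insert seg ch.length)) ++ [PySem.Dict.empty])).getD k PySem.Dict.empty).get? s =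
      if k = node ∧ s = seg then some ch.length else (ch.getD k PySem.Dict.empty).get? s := by
  by_cases hk : k < ch.length
  · rw [getD_append_lt _ _ _ _ (by simpa using hk)]
    by_cases hkn : k = node
    · subst hkn
      rw [getD_set_self _ _ _ _ hk]
      rw [PySem.Dict.get?_insert]
      by_cases hs : s = seg
      · simp [hs]
      · simp [hs]
    · rw [getD_set_ne _ _ _ _ _ (Ne.symm hkn)]
      simp [hkn]
  · have hne : ¬ (k = node ∧ s = seg) := fun h => hk (h.1 ▸ hnode)
    rw [if_neg hne]
    by_cases hkl : k = ch.length
    · have h1 : ((ch.set node ((ch.getD node PySem.Dict.empty).insert seg ch.length)) ++ [PySem.Dict.empty]).getD k PySem.Dict.empty = PySem.Dict.empty := by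
        rw [show k = (ch.set node ((ch.getD node PySem.Dict.empty).insert seg ch.length)).length from by simp [hkl]]
        exact getD_append_self _ _ _
      rw [h1, getD_ge ch _ k (by omega), PySem.Dict.get?_empty]
    · have hge : ch.length + 1 ≤ k := by omega
      rw [getD_append_ge _ _ _ _ (by simpa using hge)]
      rw [getD_ge _ _ _ (by omega)]

theorem findNode?_create (ch : List (PySem.Dict String Nat)) (node : Nat) (seg : String)
    (hnode : node < ch.length)
    (hmiss : (ch.getD node PySem.Dict.empty).get? seg = none) :
    ∀ (ss : List String) (k m : Nat),
      findNode? ((ch.set node ((ch.getD node PySem.Dict.empty).insert seg ch.length)) ++ [PySem.Dict.empty]) k ss = some m ↔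
      (findNode? ch k ss = some m ∨
        (m = ch.length ∧ ∃ ss₁, ss = ss₁ ++ [seg] ∧ findNode? ch k ss₁ = some node)) := by
  intro ss
  set ch' := (ch.set node ((ch.getD node PySem.Dict.empty).insert seg ch.length)) ++ [PySem.Dict.empty] with hch'
  induction ss with
  | nil =>
    intro k m
    simp only [findNode?]
    constructor
    · intro h; exact Or.inl h
    · rintro (h | ⟨_, ss₁, hss, _⟩)
      · exact h
      · exact absurd hss (by simp)
  | cons s t ih =>
    intro k m
    have hedge := edge_create ch node seg hnode hmiss k s
    rw [← hch'] at hedge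
    by_cases hks : k = node ∧ s = seg
    · obtain ⟨hk, hs⟩ := hks
      subst hk; subst hs
      rw [if_pos ⟨rfl, rfl⟩] at hedge
      simp only [findNode?, hedge, hmiss]
      cases t with
      | nil =>
        simp only [findNode?]
        constructor
        · intro h
          right
          refine ⟨(Option.some.inj h).symm, [], by simp, by simp [findNode?]⟩
        · rintro (h | ⟨hm, ss₁, hss, hf⟩)
          · exact absurd h (by simp)
          · have hnil : ss₁ = [] := by
              cases ss₁ with
              | nil => rfl
              | cons a b =>
                exfalso
                have := congrArg List.length hss
                simp at this
            subst hnil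
            simp [hm]
      | cons s' t' =>
        have hedge' := edge_create ch k s hnode hmiss ch.length s'
        rw [← hch'] at hedge'
        have hno : ¬ (ch.length = k ∧ s' = s) := fun h => by omega
        rw [if_neg hno, getD_ge _ _ _ (le_refl _), PySem.Dict.get?_empty] at hedge'
        simp only [findNode?, hedge']
        constructor
        · intro h; exact absurd h (by simp)
        · rintro (h | ⟨hm, ss₁, hss, hf⟩)
          · exact absurd h (by simp)
          · cases ss₁ with
            | nil => simp at hss
            | cons a b =>
              simp only [List.cons_append, List.cons.injEq] at hss
              obtain ⟨ha, hb⟩ := hss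
              subst ha
              simp only [findNode?, hmiss] at hf
              exact absurd hf (by simp)
    · rw [if_neg hks] at hedge
      simp only [findNode?, hedge]
      cases hg : (ch.getD k PySem.Dict.empty).get? s with
      | none =>
        simp only
        constructor
        · intro h; exact absurd h (by simp)
        · rintro (h | ⟨hm, ss₁, hss, hf⟩)
          · exact h
          · cases ss₁ with
            | nil =>
              simp at hss
              obtain ⟨hs1, ht1⟩ := hss
              simp only [findNode?] at hf
              exact absurd ⟨Option.some.inj hf, hs1⟩ hks
            | cons a b =>
              simp only [List.cons_append, List.cons.injEq] at hss
              obtain ⟨ha, hb⟩ := hss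
              subst ha
              simp only [findNode?, hg] at hf
              exact absurd hf (by simp)
      | some m' =>
        rw [ih m' m]
        constructor
        · rintro (h | ⟨hm, ss₂, hss, hf⟩)
          · exact Or.inl h
          · right
            refine ⟨hm, s :: ss₂, by simp [hss], ?_⟩
            simp only [findNode?, hg]
            exact hf
        · rintro (h | ⟨hm, ss₁, hss, hf⟩)
          · exact Or.inl h
          · cases ss₁ with
            | nil =>
              simp at hss
              obtain ⟨hs1, ht1⟩ := hss
              simp only [findNode?] at hf
              exact absurd ⟨Option.some.inj hf, hs1⟩ hks
            | cons a b =>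
              simp only [List.cons_append, List.cons.injEq] at hss
              obtain ⟨ha, hb⟩ := hss
              subst ha
              simp only [findNode?, hg] at hf
              exact Or.inr ⟨hm, b, hb, hf⟩

-- ---- invariant maintenance ----

theorem inv_create (ch : List (PySem.Dict String Nat)) (tm : List Bool) (pre : List String)
    (hInv : TrieInv ch tm pre) (node : Nat) (seg : String) (hnode : node < ch.length)
    (hmiss : (ch.getD node PySem.Dict.empty).get? seg = none) :
    TrieInv ((ch.set node ((ch.getD node PySem.Dict.empty).insert seg ch.length)) ++ [PySem.Dict.empty]) (tm ++ [false]) pre := by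
  obtain ⟨hlen, hpos, hR, hInj, hM⟩ := hInv
  set ch' := (ch.set node ((ch.getD node PySem.Dict.empty).insert seg ch.length)) ++ [PySem.Dict.empty] with hch'
  have hlen' : ch'.length = ch.length + 1 := by simp [hch']
  refine ⟨by simp [hlen', hlen], by omega, ?_, ?_, ?_⟩
  · intro k s m hg
    rw [edge_create ch node seg hnode hmiss k s] at hg
    by_cases hks : k = node ∧ s = seg
    · rw [if_pos hks] at hg
      have hm := Option.some.inj hg
      rw [hlen']
      omega
    · rw [if_neg hks] at hg
      have := hR k s m hg
      omega
  · intro ss ss' m h1 h2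
    rw [findNode?_create ch node seg hnode hmiss] at h1 h2
    rcases h1 with h1 | ⟨hm1, ss₁, hss1, hf1⟩
    · rcases h2 with h2 | ⟨hm2, ss₂, hss2, hf2⟩
      · exact hInj ss ss' m h1 h2
      · have := findNode?_lt ch hR ss 0 m hpos h1
        omega
    · rcases h2 with h2 | ⟨hm2, ss₂, hss2, hf2⟩
      · have := findNode?_lt ch hR ss' 0 m hpos h2
        omega
      · rw [hss1, hss2, hInj ss₁ ss₂ node hf1 hf2]
  · intro ss
    rw [← hM ss]
    constructor
    · rintro ⟨m, hf, htm⟩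
      rw [findNode?_create ch node seg hnode hmiss] at hf
      rcases hf with hf | ⟨hm, _, _, _⟩
      · have hmlt : m < ch.length := findNode?_lt ch hR ss 0 m hpos hf
        rw [getD_append_lt _ _ _ _ (by omega)] at htm
        exact ⟨m, hf, htm⟩
      · subst hm
        rw [hlen, getD_append_self] at htm
        exact absurd htm (by simp)
    · rintro ⟨m, hf, htm⟩
      have hmlt : m < ch.length := findNode?_lt ch hR ss 0 m hpos hf
      refine ⟨m, ?_, ?_⟩
      · rw [findNode?_create ch node seg hnode hmiss]
        exact Or.inl hf
      · rw [getD_append_lt _ _ _ _ (by omega)]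
        exact htm

theorem inv_mark (ch : List (PySem.Dict String Nat)) (tm : List Bool) (pre : List String)
    (hInv : TrieInv ch tm pre) (p : String) (node : Nat)
    (hfind : findNode? ch 0 (pyparts p) = some node)
    (hunm : tm.getD node false = false) :
    TrieInv ch (tm.set node true) (pre ++ [p]) := by
  obtain ⟨hlen, hpos, hR, hInj, hM⟩ := hInv
  have hnode : node < tm.length := by
    have := findNode?_lt ch hR (pyparts p) 0 node hpos hfind
    omega
  refine ⟨by simp [hlen], hpos, hR, hInj, ?_⟩
  intro ss
  constructor
  · rintro ⟨m, hf, htm⟩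
    by_cases hm : m = node
    · subst hm
      exact ⟨p, by simp, hInj _ _ _ hfind hf⟩
    · rw [getD_set_ne _ _ _ _ _ (Ne.symm hm)] at htm
      have := (hM ss).mp ⟨m, hf, htm⟩
      obtain ⟨q, hq, hqs⟩ := this
      exact ⟨q, by simp [hq], hqs⟩
  · rintro ⟨q, hq, hqs⟩
    rcases List.mem_append.mp hq with hq | hq
    · obtain ⟨m, hf, htm⟩ := (hM ss).mpr ⟨q, hq, hqs⟩
      refine ⟨m, hf, ?_⟩
      have hm : m ≠ node := fun h => by rw [h, hunm] at htm; exact absurd htm (by simp)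
      rw [getD_set_ne _ _ _ _ _ (Ne.symm hm)]
      exact htm
    · have : q = p := by simpa using hq
      subst this
      refine ⟨node, hqs ▸ hfind, ?_⟩
      rw [getD_set_self _ _ _ _ hnode]

theorem inv_dup (ch : List (PySem.Dict String Nat)) (tm : List Bool) (pre : List String)
    (hInv : TrieInv ch tm pre) (p : String) (node : Nat)
    (hfind : findNode? ch 0 (pyparts p) = some node)
    (hm : tm.getD node false = true) :
    TrieInv ch tm (pre ++ [p]) := by
  obtain ⟨hlen, hpos, hR, hInj, hM⟩ := hInv
  refine ⟨hlen, hpos, hR, hInj, ?_⟩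
  intro ss
  rw [hM ss]
  constructor
  · rintro ⟨q, hq, hqs⟩
    exact ⟨q, by simp [hq], hqs⟩
  · rintro ⟨q, hq, hqs⟩
    rcases List.mem_append.mp hq with hq | hq
    · exact ⟨q, hq, hqs⟩
    · have hqp : q = p := by simpa using hq
      obtain ⟨r, hr, hrs⟩ := (hM (pyparts p)).mp ⟨node, hfind, hm⟩
      rw [hqp] at hqs
      exact ⟨r, hr, hrs.trans hqs⟩

-- ---- childF against the invariant ----

theorem childF_spec (ch : List (PySem.Dict String Nat)) (tm : List Bool) (pre : List String)
    (hInv : TrieInv ch tm pre) (pfx : List String) (node : Nat) (seg : String)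
    (hfind : findNode? ch 0 pfx = some node) :
    ∃ n' ch' tm', childF ch tm node seg = (n', ch', tm') ∧ TrieInv ch' tm' pre ∧
      findNode? ch' 0 (pfx ++ [seg]) = some n' := by
  obtain ⟨hlen, hpos, hR, hInj, hM⟩ := hInv
  have hnode : node < ch.length := findNode?_lt ch hR pfx 0 node hpos hfind
  cases hg : (ch.getD node PySem.Dict.empty).get? seg with
  | some m =>
    refine ⟨m, ch, tm, by simp only [childF]; rw [hg], ⟨hlen, hpos, hR, hInj, hM⟩, ?_⟩
    rw [findNode?_snoc, hfind]
    show findNode? ch node [seg] = some m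
    simp only [findNode?]
    rw [hg]
  | none =>
    refine ⟨ch.length,
      (ch.set node ((ch.getD node PySem.Dict.empty).insert seg ch.length)) ++ [PySem.Dict.empty],
      tm ++ [false], by simp only [childF]; rw [hg], ?_, ?_⟩
    · exact inv_create ch tm pre ⟨hlen, hpos, hR, hInj, hM⟩ node seg hnode hg
    · rw [findNode?_create ch node seg hnode hg]
      exact Or.inr ⟨rfl, pfx, rfl, hfind⟩

-- ---- the terminal test is membership of the joined prefix in `pre` ----

theorem marked_take (ch : List (PySem.Dict String Nat)) (tm : List Bool) (pre : List String)
    (hInv : TrieInv ch tm pre) (p : String) (t : Nat) (node : Nat)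
    (hfind : findNode? ch 0 ((pyparts p).take (t + 1)) = some node) :
    tm.getD node false = decide (PySem.Str.join "/" ((pyparts p).take (t + 1)) ∈ pre) := by
  obtain ⟨hlen, hpos, hR, hInj, hM⟩ := hInv
  cases htm : tm.getD node false with
  | true =>
    obtain ⟨q, hq, hqs⟩ := (hM _).mp ⟨node, hfind, htm⟩
    have : PySem.Str.join "/" ((pyparts p).take (t + 1)) = q := by
      rw [← hqs, join_pyparts]
    rw [this]
    simp [hq]
  | false =>
    by_cases hmem : PySem.Str.join "/" ((pyparts p).take (t + 1)) ∈ pre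
    · obtain ⟨m, hf, htm'⟩ := (hM _).mpr ⟨_, hmem, parts_join_take p t⟩
      rw [hfind] at hf
      have hnm : node = m := Option.some.inj hf
      rw [← hnm, htm] at htm'
      exact absurd htm' (by simp)
    · simp [hmem]

-- ---- B's inner walk against the reference ----

theorem walk (p : String) (pre : List String) :
    ∀ (rest : List String) (t node : Nat) (acc : String)
      (ch : List (PySem.Dict String Nat)) (tm : List Bool) (found : List String),
    (pyparts p).drop (t + 1) = rest →
    t + 1 ≤ (pyparts p).length →
    TrieInv ch tm pre →
    findNode? ch 0 ((pyparts p).take (t + 1)) = some node →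
    acc = PySem.Str.join "/" ((pyparts p).take (t + 1)) →
    found = ((List.range t).map (fun k => PySem.Str.join "/" ((pyparts p).take (k + 1)))).filter
      (fun q => decide (q ∈ pre)) →
    ∃ node' acc' ch' tm',
      rest.foldl bInner (node, acc, found, ch, tm) = (node', acc',
        ((List.range ((pyparts p).length - 1)).map
          (fun k => PySem.Str.join "/" ((pyparts p).take (k + 1)))).filter
          (fun q => decide (q ∈ pre)), ch', tm') ∧
      TrieInv ch' tm' pre ∧ findNode? ch' 0 (pyparts p) = some node' := by
  intro rest
  induction rest with
  | nil =>
    intro t node acc ch tm found hdrop ht hInv hfind hacc hfound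
    have hLle : (pyparts p).length ≤ t + 1 := by
      by_contra h
      have := List.drop_eq_nil_iff.mp hdrop
      omega
    have hteq : t + 1 = (pyparts p).length := by omega
    have htake : (pyparts p).take (t + 1) = pyparts p := by
      rw [List.take_of_length_le (by omega)]
    refine ⟨node, acc, ch, tm, ?_, hInv, htake ▸ hfind⟩
    simp only [List.foldl_nil]
    rw [hfound]
    have : t = (pyparts p).length - 1 := by omega
    rw [this]
  | cons seg rest' ih =>
    intro t node acc ch tm found hdrop ht hInv hfind hacc hfound
    have hget : (pyparts p)[t + 1]? = some seg := by
      have h0 : ((pyparts p).drop (t + 1))[0]? = (pyparts p)[t + 1 + 0]? := List.getElem?_drop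
      rw [hdrop] at h0
      simpa using h0.symm
    have htlt : t + 1 < (pyparts p).length := by
      by_contra h
      rw [List.getElem?_eq_none (by omega)] at hget
      exact absurd hget (by simp)
    have htake2 : (pyparts p).take (t + 2) = (pyparts p).take (t + 1) ++ [seg] := by
      rw [List.take_add_one, hget]
      rfl
    have htakene : (pyparts p).take (t + 1) ≠ [] := by
      intro hnil
      rw [List.take_eq_nil_iff] at hnil
      rcases hnil with h | h
      · omega
      · exact pyparts_ne_nil p h
    -- the step
    have hterm := marked_take ch tm pre hInv p t node hfind
    obtain ⟨n₁, ch₁, tm₁, hchild, hInv₁, hfind₁⟩ :=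
      childF_spec ch tm pre hInv ((pyparts p).take (t + 1)) node seg hfind
    have hstep : bInner (node, acc, found, ch, tm) seg =
        (n₁, acc ++ "/" ++ seg,
          if tm.getD node false then found ++ [acc] else found, ch₁, tm₁) := by
      simp only [bInner, hchild]
    have hacc' : acc ++ "/" ++ seg = PySem.Str.join "/" ((pyparts p).take (t + 2)) := by
      rw [htake2, join_snoc _ htakene, hacc]
    have hfound' : (if tm.getD node false then found ++ [acc] else found) =
        ((List.range (t + 1)).map (fun k => PySem.Str.join "/" ((pyparts p).take (k + 1)))).filter
          (fun q => decide (q ∈ pre)) := by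
      rw [List.range_succ, List.map_append, List.filter_append, ← hfound]
      rw [hterm, hacc]
      by_cases hmem : PySem.Str.join "/" ((pyparts p).take (t + 1)) ∈ pre
      · simp [hmem]
      · simp [hmem]
    have hdrop' : (pyparts p).drop (t + 2) = rest' := by
      have : (pyparts p).drop (t + 2) = ((pyparts p).drop (t + 1)).drop 1 := by
        rw [List.drop_drop]
      rw [this, hdrop]
      simp
    obtain ⟨node', acc', ch', tm', hfold, hInv', hfind'⟩ :=
      ih (t + 1) n₁ (acc ++ "/" ++ seg) ch₁ tm₁
        (if tm.getD node false then found ++ [acc] else found)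
        hdrop' (by omega) hInv₁ (htake2 ▸ hfind₁) hacc' hfound'
    refine ⟨node', acc', ch', tm', ?_, hInv', hfind'⟩
    rw [List.foldl_cons, hstep, hfold]

-- ---- B's outer loop against the reference ----

theorem bOuter_spec (l : List String) :
    ∀ (pre out : List String) (ch : List (PySem.Dict String Nat)) (tm : List Bool),
    TrieInv ch tm pre →
    (l.foldl bStep (ch, tm, out)).2.2 = out ++ spec pre l := by
  induction l with
  | nil => intro pre out ch tm _; simp [spec]
  | cons p l' ih =>
    intro pre out ch tm hInv
    obtain ⟨s0, rest, hparts⟩ : ∃ s0 rest, pyparts p = s0 :: rest := by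
      cases hpp : pyparts p with
      | nil => exact absurd hpp (pyparts_ne_nil p)
      | cons s0 rest => exact ⟨s0, rest, rfl⟩
    have hfind0 : findNode? ch 0 ([] : List String) = some 0 := rfl
    obtain ⟨n0, ch0, tm0, hchild0, hInv0, hfindn0⟩ :=
      childF_spec ch tm pre hInv [] 0 s0 hfind0
    have htake1 : (pyparts p).take 1 = [s0] := by rw [hparts]; rfl
    have hdrop1 : (pyparts p).drop 1 = rest := by rw [hparts]; rfl
    have hs0 : s0 = PySem.Str.join "/" ((pyparts p).take 1) := by
      rw [htake1, strJoin_singleton]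
    obtain ⟨node', acc', ch1, tm1, hfold, hInv1, hfind1⟩ :=
      walk p pre rest 0 n0 s0 ch0 tm0 []
        hdrop1 (by rw [hparts]; simp) hInv0 (htake1 ▸ hfindn0) hs0 (by simp)
    have hterm := marked_take ch1 tm1 pre hInv1 p ((pyparts p).length - 1) node'
      (by
        rw [List.take_of_length_le (by rw [hparts]; simp)]
        exact hfind1)
    rw [List.take_of_length_le (by rw [hparts]; simp), join_pyparts] at hterm
    have hstep : bStep (ch, tm, out) p =
        (if tm1.getD node' false then (ch1, tm1, out ++ [p])
         else (ch1, tm1.set node' true, out ++ (cand p).filter (fun q => decide (q ∈ pre)))) := by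
      simp only [bStep, hparts, hchild0, hfold, cand]
    rw [List.foldl_cons, hstep]
    by_cases hmem : p ∈ pre
    · rw [hterm]
      simp only [hmem, decide_true, if_pos]
      rw [ih (pre ++ [p]) (out ++ [p]) ch1 tm1
        (inv_dup ch1 tm1 pre hInv1 p node' hfind1 (by rw [hterm]; simp [hmem]))]
      rw [spec, contrib, if_pos hmem]
      simp
    · rw [hterm]
      simp only [hmem, decide_false, Bool.false_eq_true, if_false]
      rw [ih (pre ++ [p]) _ ch1 (tm1.set node' true)
        (inv_mark ch1 tm1 pre hInv1 p node' hfind1 (by rw [hterm]; simp [hmem]))]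
      rw [spec, contrib, if_neg hmem]
      simp

theorem inv_init : TrieInv [PySem.Dict.empty] [false] [] := by
  refine ⟨rfl, by simp, ?_, ?_, ?_⟩
  · intro k s m hg
    have : ([PySem.Dict.empty] : List (PySem.Dict String Nat)).getD k PySem.Dict.empty = PySem.Dict.empty := by
      cases k with
      | zero => rfl
      | succ k' => rw [getD_ge _ _ _ (by simp)]
    rw [this, PySem.Dict.get?_empty] at hg
    exact absurd hg (by simp)
  · intro ss ss' m h1 h2
    have hnil : ∀ (u : List String), findNode? [PySem.Dict.empty] 0 u = some m → u = [] := by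
      intro u hu
      cases u with
      | nil => rfl
      | cons a b =>
        simp only [findNode?] at hu
        have : (([PySem.Dict.empty] : List (PySem.Dict String Nat)).getD 0 PySem.Dict.empty).get? a = none := by
          rw [show ([PySem.Dict.empty] : List (PySem.Dict String Nat)).getD 0 PySem.Dict.empty = PySem.Dict.empty from rfl, PySem.Dict.get?_empty]
        rw [this] at hu
        exact absurd hu (by simp)
    rw [hnil ss h1, hnil ss' h2]
  · intro ss
    constructor
    · rintro ⟨m, hf, htm⟩
      exfalso
      cases ss with
      | nil =>
        simp only [findNode?] at hf
        rw [← Option.some.inj hf] at htm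
        exact absurd htm (by simp [List.getD])
      | cons a b =>
        simp only [findNode?] at hf
        have : (([PySem.Dict.empty] : List (PySem.Dict String Nat)).getD 0 PySem.Dict.empty).get? a = none := by
          rw [show ([PySem.Dict.empty] : List (PySem.Dict String Nat)).getD 0 PySem.Dict.empty = PySem.Dict.empty from rfl, PySem.Dict.get?_empty]
        rw [this] at hf
        exact absurd hf (by simp)
    · rintro ⟨q, hq, _⟩
      exact absurd hq (by simp)

-- ---- A's loops against the reference ----

theorem aInner_eq (pre : List String) (p : String) :
    List.map (fun i => PySem.Str.join "/" (PySem.List.slice (pyparts p) none (some (i + 1))))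
      (List.filter
        (fun i => decide (PySem.Str.join "/" (PySem.List.slice (pyparts p) none (some (i + 1))) ≠ p ∧
          PySem.Set.contains (PySem.Set.add (PySem.Set.ofList pre) p)
            (PySem.Str.join "/" (PySem.List.slice (pyparts p) none (some (i + 1)))) = true))
        (PySem.List.pyRange 0 ((pyparts p).length : Int))) =
      (cand p).filter (fun q => decide (q ∈ pre)) := by
  have hN1 : 1 ≤ (pyparts p).length := by
    cases hp : pyparts p with
    | nil => exact absurd hp (pyparts_ne_nil p)
    | cons _ _ => simp
  set N := (pyparts p).length with hN
  set g : Nat → String := fun k => PySem.Str.join "/" ((pyparts p).take (k + 1)) with hg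
  have hslice : ∀ k : Nat, PySem.List.slice (pyparts p) none (some ((k : Int) + 1)) = (pyparts p).take (k + 1) := by
    intro k
    have : ((k : Int) + 1) = ((k + 1 : Nat) : Int) := by push_cast; ring
    rw [this, PySem.List.slice_to_natCast]
  have hrange : PySem.List.pyRange 0 (N : Int) = List.map (fun (k : Nat) => (k : Int)) (List.range N) := by
    rw [PySem.List.pyRange_one]
    have h1 : (((N : Int)) - 0).toNat = N := by omega
    rw [h1]
    apply List.map_congr_left
    intro k _
    omega
  rw [hrange, List.filter_map, List.map_map]
  have hcomp : ∀ (k : Nat),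
      ((fun i => PySem.Str.join "/" (PySem.List.slice (pyparts p) none (some (i + 1)))) ∘ (fun k : Nat => (k : Int))) k = g k := by
    intro k
    simp only [Function.comp, hslice k, hg]
  have hmem : ∀ q : String, (PySem.Set.contains (PySem.Set.add (PySem.Set.ofList pre) p) q = true) ↔ (q ∈ pre ∨ q = p) := by
    intro q
    rw [PySem.Set.contains_iff, PySem.Set.mem_add, PySem.Set.mem_ofList]
  have hsplitN : List.range N = List.range (N - 1) ++ [N - 1] := by
    have : N = (N - 1) + 1 := by omega
    rw [this]
    rw [List.range_succ]
    simp
  rw [hsplitN, List.filter_append, List.map_append]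
  have hlast : g (N - 1) = p := by
    show PySem.Str.join "/" ((pyparts p).take ((N - 1) + 1)) = p
    have h1 : (N - 1) + 1 = N := by omega
    rw [h1, hN, List.take_length]
    exact join_pyparts p
  have hlastfil :
      List.filter ((fun i => decide (PySem.Str.join "/" (PySem.List.slice (pyparts p) none (some (i + 1))) ≠ p ∧
          PySem.Set.contains (PySem.Set.add (PySem.Set.ofList pre) p)
            (PySem.Str.join "/" (PySem.List.slice (pyparts p) none (some (i + 1)))) = true)) ∘ (fun k : Nat => (k : Int)))
        [N - 1] = [] := by
    have hp2 : PySem.Str.join "/" ((pyparts p).take (N - 1 + 1)) = p := hlast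
    simp only [List.filter_cons, List.filter_nil, Function.comp, hslice]
    simp [hp2]
  rw [hlastfil, List.map_nil, List.append_nil]
  have hfil : List.filter ((fun i => decide (PySem.Str.join "/" (PySem.List.slice (pyparts p) none (some (i + 1))) ≠ p ∧
          PySem.Set.contains (PySem.Set.add (PySem.Set.ofList pre) p)
            (PySem.Str.join "/" (PySem.List.slice (pyparts p) none (some (i + 1)))) = true)) ∘ (fun k : Nat => (k : Int)))
        (List.range (N - 1)) =
      List.filter (fun k => decide (g k ∈ pre)) (List.range (N - 1)) := by
    apply List.filter_congr
    intro k hk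
    rw [List.mem_range] at hk
    have hkN : k + 1 < N := by omega
    have hne : g k ≠ p := join_take_ne p k (by omega)
    simp only [Function.comp, hslice]
    simp only [hg] at hne ⊢
    rw [decide_eq_decide]
    constructor
    · rintro ⟨_, hc⟩
      rcases (hmem _).mp hc with h | h
      · exact h
      · exact absurd h hne
    · intro h
      exact ⟨hne, (hmem _).mpr (Or.inl h)⟩
  rw [hfil]
  have hmapg : List.map ((fun i => PySem.Str.join "/" (PySem.List.slice (pyparts p) none (some (i + 1)))) ∘ (fun k : Nat => (k : Int)))
      (List.filter (fun k => decide (g k ∈ pre)) (List.range (N - 1))) =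
      List.map g (List.filter (fun k => decide (g k ∈ pre)) (List.range (N - 1))) := by
    apply List.map_congr_left
    intro k _
    exact hcomp k
  rw [hmapg]
  have hfm : List.map g (List.filter (fun k => decide (g k ∈ pre)) (List.range (N - 1))) =
      (List.map g (List.range (N - 1))).filter (fun q => decide (q ∈ pre)) := by
    rw [List.filter_map]
    congr 1
  rw [hfm]
  rfl

theorem aOuter_spec (l : List String) : ∀ (pre dups : List String),
    (l.foldl aStep (PySem.Set.ofList pre, dups)).2 = dups ++ spec pre l := by
  induction l with
  | nil => intro pre dups; simp [spec]
  | cons p rest ih =>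
    intro pre dups
    rw [List.foldl_cons, spec]
    by_cases hc : PySem.Set.contains (PySem.Set.ofList pre) p = true
    · have hmem : p ∈ pre := PySem.Set.mem_ofList pre p |>.mp ((PySem.Set.contains_iff _ _).mp hc)
      have hstep : aStep (PySem.Set.ofList pre, dups) p = (PySem.Set.ofList (pre ++ [p]), dups ++ [p]) := by
        rw [aStep]
        simp only [hc, if_pos]
        rw [PySem.Set.ofList_append_singleton,
          PySem.Set.add_of_mem ((PySem.Set.mem_ofList pre p).mpr hmem)]
      rw [hstep, ih]
      rw [contrib, if_pos hmem]
      simp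
    · have hnmem : p ∉ pre := fun h =>
        hc ((PySem.Set.contains_iff _ _).mpr ((PySem.Set.mem_ofList pre p).mpr h))
      have hstep : aStep (PySem.Set.ofList pre, dups) p =
          (PySem.Set.ofList (pre ++ [p]),
            dups ++ (cand p).filter (fun q => decide (q ∈ pre))) := by
        rw [aStep]
        simp only [hc]
        rw [if_neg (by simp)]
        have hbody : (fun dups i =>
            let part := PySem.Str.join "/" (PySem.List.slice (pyparts p) none (some (i + 1)))
            if part ≠ p ∧ PySem.Set.contains (PySem.Set.add (PySem.Set.ofList pre) p) part = true
            then dups ++ [part] else dups) =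
            (fun (dups : List String) (i : Int) =>
              if (PySem.Str.join "/" (PySem.List.slice (pyparts p) none (some (i + 1))) ≠ p ∧
                  PySem.Set.contains (PySem.Set.add (PySem.Set.ofList pre) p)
                    (PySem.Str.join "/" (PySem.List.slice (pyparts p) none (some (i + 1)))) = true)
              then dups ++ [PySem.Str.join "/" (PySem.List.slice (pyparts p) none (some (i + 1)))] else dups) := rfl
        rw [hbody, PySem.List.foldl_append_ite
          (p := fun i : Int => (PySem.Str.join "/" (PySem.List.slice (pyparts p) none (some (i + 1))) ≠ p ∧
              PySem.Set.contains (PySem.Set.add (PySem.Set.ofList pre) p)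
                (PySem.Str.join "/" (PySem.List.slice (pyparts p) none (some (i + 1)))) = true))
          (f := fun i : Int => PySem.Str.join "/" (PySem.List.slice (pyparts p) none (some (i + 1))))]
        rw [aInner_eq pre p]
        rw [PySem.Set.ofList_append_singleton]
      rw [hstep, ih]
      rw [contrib, if_neg hnmem]
      simp

theorem main_eq (paths : List String) :
    find_duplicate_paths_py paths = find_duplicate_paths_py_alt paths := by
  show (paths.foldl aStep (PySem.Set.empty, [])).2 =
    (paths.foldl bStep ([PySem.Dict.empty], [false], [])).2.2
  have hA := aOuter_spec paths [] []
  have hB := bOuter_spec paths [] [] [PySem.Dict.empty] [false] inv_init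
  simp only [List.nil_append] at hA hB
  exact hA.trans hB.symm

-- ===== VERDICT (by name: the statement is the Claim_ definition above) =====
theorem find_duplicate_paths_py_spec : Claim_equal_find_duplicate_paths_py := by
  intro paths _
  unfold Spec_find_duplicate_paths_py
  exact main_eq paths
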